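-- pv_equiv track=rewrite | github.com/lumina37/LVC-CC | lvccc/task/posetrace.py | view_indices
-- ===== SOURCE A (Python) =====
-- from collections.abc import Iterator
--
-- def view_indices(views: int, is_rot: bool) -> Iterator[int]:
--     if is_rot:
--         row_step, col_step = 1, views
--     else:
--         row_step, col_step = views, 1
--
--     rowidx = 0
--     for row in range(views):
--         colidx = rowidx + row * row_step
--         for col in range(views):
--             idx = colidx + col * col_step
--             yield idx
-- ===== SOURCE B (Python) =====
-- def view_indices(views: int, is_rot: bool):
--     row_step, col_step = (1, views) if is_rot else (views, 1)
--     n = views if views > 0 else 0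
--     for i in range(n * n):
--         yield (i // n) * row_step + (i % n) * col_step
-- ===== Notes on version B (the rewrite author's own statement) =====
-- stated objective: alternative
-- what changed: Replaces the two nested range loops with a single flat loop over n*n indices, recovering the (row, col) pair by floor-division and modulus.
import Mathlib
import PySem

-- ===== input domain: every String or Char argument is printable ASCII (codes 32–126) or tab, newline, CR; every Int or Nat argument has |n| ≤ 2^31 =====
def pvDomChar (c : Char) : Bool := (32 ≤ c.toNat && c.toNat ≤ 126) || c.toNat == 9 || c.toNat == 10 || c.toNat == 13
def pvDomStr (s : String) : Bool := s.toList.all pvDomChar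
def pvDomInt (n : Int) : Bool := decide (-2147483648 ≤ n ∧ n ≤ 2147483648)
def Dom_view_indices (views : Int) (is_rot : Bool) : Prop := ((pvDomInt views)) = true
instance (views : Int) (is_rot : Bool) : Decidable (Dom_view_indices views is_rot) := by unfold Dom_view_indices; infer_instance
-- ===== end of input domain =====

-- B flattens A's two nested loops into one loop over n*n indices, pairing row/col by divmod; same cost, different decomposition.

-- ===== PORT A =====
-- generator collected as the list of yielded values
def view_indices (views : Int) (is_rot : Bool) : List Int :=
  let row_step : Int := if is_rot then 1 else views
  let col_step : Int := if is_rot then views else 1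
  let rowidx : Int := 0
  (PySem.List.pyRange 0 views 1).foldl (fun acc row =>
    let colidx := rowidx + row * row_step
    (PySem.List.pyRange 0 views 1).foldl (fun acc2 col =>
      acc2 ++ [colidx + col * col_step]) acc) []

-- ===== PORT B =====
def view_indices_alt (views : Int) (is_rot : Bool) : List Int :=
  let row_step : Int := if is_rot then 1 else views
  let col_step : Int := if is_rot then views else 1
  let n : Int := if views > 0 then views else 0
  (PySem.List.pyRange 0 (n * n) 1).map (fun i =>
    PySem.Int.floordiv i n * row_step + PySem.Int.mod i n * col_step)

-- ===== PRECONDITION & SPEC =====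
def Spec_view_indices (views : Int) (is_rot : Bool) (out : List Int) : Prop := out = view_indices_alt views is_rot
instance (views : Int) (is_rot : Bool) (out : List Int) : Decidable (Spec_view_indices views is_rot out) := by unfold Spec_view_indices; infer_instance

-- ===== CLAIM (what is proved, stated in full; the proofs are below) =====
def Claim_equal_view_indices : Prop := ∀ (views : Int) (is_rot : Bool), Dom_view_indices views is_rot → Spec_view_indices views is_rot (view_indices views is_rot)

-- ===== LEMMAS AND PROOFS =====

-- A as a flatMap of maps
theorem view_indices_eq_flatMap (views : Int) (is_rot : Bool) :
    view_indices views is_rot =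
      (PySem.List.pyRange 0 views 1).flatMap (fun row =>
        (PySem.List.pyRange 0 views 1).map (fun col =>
          (0 + row * (if is_rot then 1 else views)) + col * (if is_rot then views else 1))) := by
  unfold view_indices
  simp only [PySem.List.foldl_append_singleton_eq_map]
  rw [show (fun (acc : List Int) (row : Int) =>
        acc ++ (PySem.List.pyRange 0 views 1).map (fun col =>
          (0 + row * (if is_rot then 1 else views)) + col * (if is_rot then views else 1)))
      = (fun acc row => acc ++ (fun row =>
          (PySem.List.pyRange 0 views 1).map (fun col =>
            (0 + row * (if is_rot then 1 else views)) + col * (if is_rot then views else 1))) row) from rfl]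
  rw [PySem.List.foldl_append_eq_flatMap]
  simp

-- shifting a range under a map
theorem map_pyRange_shift (a n : Int) (hn : 0 ≤ n) (g : Int → Int) :
    (PySem.List.pyRange a (a + n) 1).map g
      = (PySem.List.pyRange 0 n 1).map (fun col => g (a + col)) := by
  rw [PySem.List.pyRange_one a (a + n), PySem.List.pyRange_one 0 n]
  simp [List.map_map, Function.comp_def]

-- the flat range splits into blocks of length n
theorem flat_blocks (m : Nat) (n : Int) (hn : 0 < n) (g : Int → Int) :
    (PySem.List.pyRange 0 ((m : Int) * n) 1).map g
      = (PySem.List.pyRange 0 (m : Int) 1).flatMap (fun row =>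
          (PySem.List.pyRange 0 n 1).map (fun col => g (row * n + col))) := by
  induction m with
  | zero => simp [PySem.List.pyRange_one_eq_nil]
  | succ k ih =>
    have h1 : ((k : Int)) ≤ ((k + 1 : Nat) : Int) := by push_cast; omega
    have h0 : (0 : Int) ≤ (k : Int) := by positivity
    rw [PySem.List.pyRange_one_append 0 ((k : Int) * n) (((k+1 : Nat) : Int) * n)
        (by positivity) (by push_cast; nlinarith),
      List.map_append, ih,
      show ((k + 1 : Nat) : Int) = (k : Int) + 1 from by push_cast; ring,
      PySem.List.pyRange_one_succ_right h0]
    simp only [List.flatMap_append, List.flatMap_cons, List.flatMap_nil, List.append_nil]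
    congr 1
    have : ((k : Int) + 1) * n = (k : Int) * n + n := by ring
    rw [this, map_pyRange_shift _ _ (le_of_lt hn)]

theorem divmod_block (row col n : Int) (hn : 0 < n) (hc0 : 0 ≤ col) (hcn : col < n) :
    PySem.Int.floordiv (row * n + col) n = row ∧ PySem.Int.mod (row * n + col) n = col := by
  rw [PySem.Int.floordiv_eq_ediv_of_pos hn, PySem.Int.mod_eq_emod_of_pos hn]
  constructor
  · rw [show row * n + col = col + row * n from by ring, Int.add_mul_ediv_right _ _ (by omega), Int.ediv_eq_zero_of_lt hc0 hcn]
    ring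
  · rw [show row * n + col = col + n * row from by ring, Int.add_mul_emod_self_left, Int.emod_eq_of_lt hc0 hcn]

-- ===== VERDICT (by name: the statement is the Claim_ definition above) =====
theorem view_indices_spec : Claim_equal_view_indices := by
  intro views is_rot _
  unfold Spec_view_indices
  rw [view_indices_eq_flatMap]
  unfold view_indices_alt
  by_cases hv : views > 0
  · simp only [hv, if_pos]
    obtain ⟨m, hm⟩ : ∃ m : Nat, views = (m : Int) := ⟨views.toNat, by omega⟩
    subst hm
    rw [flat_blocks m _ hv]
    apply List.flatMap_congr
    intro row hrow
    apply List.map_congr_left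
    intro col hcol
    rw [PySem.List.mem_pyRange_one] at hcol
    obtain ⟨d, md⟩ := divmod_block row col _ hv hcol.1 hcol.2
    rw [d, md]; ring
  · have h0 : views ≤ 0 := by omega
    simp [hv, PySem.List.pyRange_one_eq_nil h0, PySem.List.pyRange_one_eq_nil (le_refl (0:Int))]
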